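-- pv_equiv track=rewrite | github.com/Danzigerrr/IAESTE-Table-Web-App-Django | playground/views.py | addLinksToRefNo
-- ===== SOURCE A (Python) =====
-- def addLinksToRefNo(newHTML, RNList):
--     for i in range(len(RNList)):
--         id = str(RNList[i])
--         ipaddress = "http://127.0.0.1:8000/playground/hello/" + id
--         href = '<a href="' + ipaddress + '" target="_blank">' + id + '</a>'
--         currrentTD = "<td>" + id + "</td>"
--         newHTML = newHTML.replace(currrentTD, '<td>' + href + '</td>')
--     return newHTML
-- ===== SOURCE B (Python) =====
-- import re
--
-- def addLinksToRefNo(newHTML, RNList):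
--     refs = {str(x) for x in RNList}
--
--     def repl(m):
--         c = m.group(1)
--         if c in refs:
--             return ('<td><a href="http://127.0.0.1:8000/playground/hello/' + c
--                     + '" target="_blank">' + c + '</a></td>')
--         return m.group(0)
--
--     return re.sub(r'<td>([^<>]*)</td>', repl, newHTML)
-- ===== Notes on version B (the rewrite author's own statement) =====
-- stated objective: faster
-- what changed: A runs one full str.replace pass over the HTML per RNList entry; B builds the set of stringified refnos once and makes a single regex pass over the HTML (re.sub on '<td>([^<>]*)</td>'), wrapping a cell iff its content is in the set.
import Mathlib
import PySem

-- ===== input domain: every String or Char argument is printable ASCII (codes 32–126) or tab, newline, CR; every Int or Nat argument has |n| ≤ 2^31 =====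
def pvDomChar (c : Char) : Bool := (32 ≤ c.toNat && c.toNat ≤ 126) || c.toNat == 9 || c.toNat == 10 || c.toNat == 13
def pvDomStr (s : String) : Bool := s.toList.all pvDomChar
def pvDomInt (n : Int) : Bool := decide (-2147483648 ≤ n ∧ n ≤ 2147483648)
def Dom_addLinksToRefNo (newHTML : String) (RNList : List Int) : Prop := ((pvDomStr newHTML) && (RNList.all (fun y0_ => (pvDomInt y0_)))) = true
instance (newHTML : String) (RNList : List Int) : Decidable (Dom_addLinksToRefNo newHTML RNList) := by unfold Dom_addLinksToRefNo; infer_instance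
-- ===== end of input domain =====

-- B replaces A's one full str.replace pass per list entry by a single left-to-right scan over
-- the HTML that wraps each <td>…</td> cell whose content is in the precomputed set of refnos.

-- ===== PORT A =====
-- A's loop 'for i in range(len(RNList)): id = str(RNList[i]); …' reads exactly the elements of
-- RNList in order; ported as a fold over RNList (string concatenation on List Char).
-- the body of one loop iteration 'newHTML = newHTML.replace(currrentTD, '<td>'+href+'</td>')'
def pvStep (html : List Char) (rn : Int) : List Char :=
  let id := PySem.Int.toChars rn
  let ipaddress := "http://127.0.0.1:8000/playground/hello/".toList ++ id
  let href := "<a href=\"".toList ++ ipaddress ++ "\" target=\"_blank\">".toList ++ id ++ "</a>".toList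
  let currrentTD := "<td>".toList ++ id ++ "</td>".toList
  PySem.Chars.replace html currrentTD ("<td>".toList ++ href ++ "</td>".toList)

def addLinksToRefNo (newHTML : String) (RNList : List Int) : String :=
  String.ofList (RNList.foldl pvStep newHTML.toList)

-- ===== PORT B =====
-- Source B does one pass 're.sub(r'<td>([^<>]*)</td>', repl, newHTML)'. PySem has no regex, so the
-- sub is ported by hand, step for step: re.sub tries a match at each position left to right;
-- at a match it emits repl's result and continues after the match, else it copies one character.
-- For this pattern a match attempt is exact deterministic parsing: literal "<td>", then the
-- maximal run of characters other than '<'/'>' (greedy [^<>]*; no backtracking can succeed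
-- since "</td>" starts with '<' and every content character is not '<'), then literal "</td>".
def pvTD : List Char := ['<', 't', 'd', '>']
def pvTDc : List Char := ['<', '/', 't', 'd', '>']
def pvW1 : List Char := "<td><a href=\"http://127.0.0.1:8000/playground/hello/".toList
def pvW2 : List Char := "\" target=\"_blank\">".toList
def pvW3 : List Char := "</a></td>".toList
def pvNoAngle (ch : Char) : Bool := ch != '<' && ch != '>'

-- one match attempt of the regex at the current position
def pvCellParse (s : List Char) : Option (List Char × List Char) :=
  match s with
  | '<' :: 't' :: 'd' :: '>' :: rest =>
    match rest.dropWhile pvNoAngle with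
    | '<' :: '/' :: 't' :: 'd' :: '>' :: r => some (rest.takeWhile pvNoAngle, r)
    | _ => none
  | _ => none

theorem pvCellParse_shrink {s : List Char} {p : List Char × List Char}
    (h : pvCellParse s = some p) : p.2.length < s.length := by
  unfold pvCellParse at h
  split at h
  · rename_i rest
    split at h
    · rename_i r hdw
      cases h
      have h1 : (rest.dropWhile pvNoAngle).length ≤ rest.length := List.length_dropWhile_le _ _
      rw [hdw] at h1
      simp at h1 ⊢
      omega
    · exact absurd h (by simp)
  · exact absurd h (by simp)

-- the re.sub scan: repl's wrapped cell on a match whose group(1) is in refs, group(0) verbatim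
-- on any other match, one copied character where the pattern does not match
def pvScan (refs : PySem.Set (List Char)) (s : List Char) : List Char :=
  match s with
  | [] => []
  | ch :: t =>
    match h : pvCellParse (ch :: t) with
    | some (c, r) =>
      (if refs.contains c then pvW1 ++ c ++ pvW2 ++ c ++ pvW3 else pvTD ++ c ++ pvTDc) ++ pvScan refs r
    | none => ch :: pvScan refs t
termination_by s.length
decreasing_by
  · exact pvCellParse_shrink h
  · simp

def addLinksToRefNo_alt (newHTML : String) (RNList : List Int) : String :=
  let refs : PySem.Set (List Char) := PySem.Set.ofList (RNList.map (fun x => PySem.Int.toChars x))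
  String.ofList (pvScan refs newHTML.toList)

-- ===== PRECONDITION & SPEC =====
def Spec_addLinksToRefNo (newHTML : String) (RNList : List Int) (out : String) : Prop := out = addLinksToRefNo_alt newHTML RNList
instance (newHTML : String) (RNList : List Int) (out : String) : Decidable (Spec_addLinksToRefNo newHTML RNList out) := by unfold Spec_addLinksToRefNo; infer_instance

-- ===== CLAIM (what is proved, stated in full; the proofs are below) =====
def Claim_equal_addLinksToRefNo : Prop := ∀ (newHTML : String) (RNList : List Int), Dom_addLinksToRefNo newHTML RNList → Spec_addLinksToRefNo newHTML RNList (addLinksToRefNo newHTML RNList)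

-- ===== LEMMAS AND PROOFS =====

-- abbreviations for the pattern and the replacement of one A-iteration
def pvCell (c : List Char) : List Char := pvTD ++ c ++ pvTDc
def pvWrap (c : List Char) : List Char := pvW1 ++ c ++ pvW2 ++ c ++ pvW3

-- characters of a cell content / refno: anything but '<' and '>'
def pvGood (c : List Char) : Prop := ∀ a ∈ c, a ≠ '<' ∧ a ≠ '>'

-- fuel-free form of Python's str.replace (PySem.Chars.replace) for a nonempty pattern
def pvRepl (old new : List Char) : List Char → List Char
  | [] => []
  | c :: t =>
    if old.isPrefixOf (c :: t) then new ++ pvRepl old new (t.drop (old.length - 1))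
    else c :: pvRepl old new t
termination_by s => s.length
decreasing_by
  all_goals simp

theorem pvRepl_go (old new : List Char) (hold : old ≠ []) :
    ∀ (fuel : Nat) (l acc : List Char), l.length ≤ fuel →
      PySem.Chars.replace.go old new fuel l acc = acc.reverse ++ pvRepl old new l := by
  intro fuel
  induction fuel with
  | zero =>
    intro l acc hl
    have hnil : l = [] := by cases l <;> simp_all
    subst hnil
    simp [PySem.Chars.replace.go, pvRepl]
  | succ f ih =>
    intro l acc hl
    cases l with
    | nil => simp [PySem.Chars.replace.go, pvRepl]
    | cons c t =>
      obtain ⟨o, oldT, rfl⟩ : ∃ o oldT, old = o :: oldT := by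
        cases old with
        | nil => exact absurd rfl hold
        | cons o oldT => exact ⟨o, oldT, rfl⟩
      rw [PySem.Chars.replace.go]
      by_cases hp : (o :: oldT).isPrefixOf (c :: t)
      · simp only [hp, if_true]
        rw [show List.drop (o :: oldT).length (c :: t) = t.drop ((o :: oldT).length - 1) by simp]
        rw [ih (t.drop ((o :: oldT).length - 1)) (new.reverse ++ acc) (by simp at hl ⊢; omega)]
        rw [pvRepl]
        simp [hp]
      · simp only [hp]
        rw [ih t (c :: acc) (by simp at hl ⊢; omega)]
        rw [pvRepl]
        simp [hp]

theorem replace_eq_pvRepl (s old new : List Char) (hold : old ≠ []) :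
    PySem.Chars.replace s old new = pvRepl old new s := by
  rw [PySem.Chars.replace]
  rw [if_neg (by simpa using hold)]
  rw [pvRepl_go old new hold s.length s [] le_rfl]
  simp

theorem pvRepl_matched (o : Char) (oldT new z : List Char) :
    pvRepl (o :: oldT) new ((o :: oldT) ++ z) = new ++ pvRepl (o :: oldT) new z := by
  rw [show (o :: oldT) ++ z = o :: (oldT ++ z) by simp]
  rw [pvRepl]
  rw [if_pos (by simp [List.isPrefixOf_iff_prefix])]
  simp

-- "no suffix of X starts an occurrence of pat, whatever follows X"
def pvNoStart (pat X : List Char) : Prop :=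
  ∀ z y, z <:+ X → z ≠ [] → ¬ pat <+: (z ++ y)

theorem pvNoStart_tail {pat : List Char} {a : Char} {X : List Char}
    (h : pvNoStart pat (a :: X)) : pvNoStart pat X := by
  intro z y hz hne
  exact h z y (hz.trans (List.suffix_cons a X)) hne

theorem pvRepl_skip (o : Char) (patT new : List Char) :
    ∀ X y, pvNoStart (o :: patT) X →
    pvRepl (o :: patT) new (X ++ y) = X ++ pvRepl (o :: patT) new y := by
  intro X
  induction X with
  | nil => simp
  | cons a X ih =>
    intro y h
    rw [List.cons_append, pvRepl]
    rw [if_neg (by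
      intro hpre
      exact h (a :: X) y (List.suffix_refl _) (by simp)
        (by rw [List.isPrefixOf_iff_prefix] at hpre; simpa using hpre))]
    rw [ih y (pvNoStart_tail h)]
    simp

-- every '<' in X is followed (inside X) by a character other than 't'
def pvEcond : List Char → Bool
  | [] => true
  | [a] => a != '<'
  | a :: b :: rest => (a != '<' || b != 't') && pvEcond (b :: rest)

theorem pvEcond_cons_of_ne {a : Char} (w : List Char) (ha : a ≠ '<') :
    pvEcond (a :: w) = pvEcond w := by
  cases w with
  | nil => simp [pvEcond, ha]
  | cons b w' => simp [pvEcond, ha]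

theorem pvEcond_tail {a : Char} {rest : List Char} (h : pvEcond (a :: rest) = true) :
    pvEcond rest = true := by
  cases rest with
  | nil => simp [pvEcond]
  | cons b w' =>
    rw [pvEcond, Bool.and_eq_true] at h
    exact h.2

theorem pvEcond_append_noLt {l1 l2 : List Char} (h1 : ∀ a ∈ l1, a ≠ '<')
    (h2 : pvEcond l2 = true) : pvEcond (l1 ++ l2) = true := by
  induction l1 with
  | nil => simpa
  | cons a l1 ih =>
    rw [List.cons_append, pvEcond_cons_of_ne _ (h1 a (by simp))]
    exact ih (fun b hb => h1 b (by simp [hb]))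

-- pvNoStart for a block all of whose suffixes fail the pattern within two characters
theorem pvNoStart_of_pvEcond (patT : List Char) :
    ∀ X, pvEcond X = true → pvNoStart ('<' :: 't' :: patT) X := by
  intro X
  induction X with
  | nil => intro _ z y hz hne; rw [List.suffix_nil.mp hz] at hne; exact absurd rfl hne
  | cons a X ih =>
    intro h z y hz hne hpre
    rcases (List.suffix_cons_iff).mp hz with rfl | hz'
    · by_cases ha : a = '<'
      · subst ha
        cases X with
        | nil => simp [pvEcond] at h
        | cons b X' =>
          rw [pvEcond, Bool.and_eq_true] at h
          have hb : b ≠ 't' := by simpa using h.1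
          rw [List.cons_append, List.cons_append] at hpre
          rcases List.cons_prefix_cons.mp hpre with ⟨_, hpre2⟩
          rcases List.cons_prefix_cons.mp hpre2 with ⟨hbt, _⟩
          exact hb hbt.symm
      · rw [List.cons_append] at hpre
        rcases List.cons_prefix_cons.mp hpre with ⟨hlt, _⟩
        exact ha hlt.symm
    · exact ih (pvEcond_tail h) z y hz' hne hpre

-- core mismatch: two different well-formed cells never match
theorem pvK (patT : List Char) :
    ∀ (id c : List Char), id ≠ c → (∀ a ∈ id, a ≠ '<') → (∀ a ∈ c, a ≠ '<') →
    ∀ y, ¬ (id ++ '<' :: patT) <+: (c ++ '<' :: '/' :: y) := by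
  intro id
  induction id with
  | nil =>
    intro c hne hid hc y hpre
    cases c with
    | nil => exact hne rfl
    | cons b c' =>
      rw [List.nil_append, List.cons_append] at hpre
      rcases List.cons_prefix_cons.mp hpre with ⟨hb, _⟩
      exact hc b (by simp) hb.symm
  | cons a id' ih =>
    intro c hne hid hc y hpre
    cases c with
    | nil =>
      rw [List.nil_append, List.cons_append] at hpre
      rcases List.cons_prefix_cons.mp hpre with ⟨ha, _⟩
      exact hid a (by simp) ha
    | cons b c' =>
      rw [List.cons_append, List.cons_append] at hpre
      rcases List.cons_prefix_cons.mp hpre with ⟨hab, hpre'⟩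
      subst hab
      exact ih c' (by intro hh; exact hne (by rw [hh])) (fun x hx => hid x (by simp [hx]))
        (fun x hx => hc x (by simp [hx])) y hpre'

-- str(n) is nonempty and free of '<' and '>'
theorem pvDigitChar_good (m : Nat) : Nat.digitChar m ≠ '<' ∧ Nat.digitChar m ≠ '>' := by
  match m with
  | 0 => decide
  | 1 => decide
  | 2 => decide
  | 3 => decide
  | 4 => decide
  | 5 => decide
  | 6 => decide
  | 7 => decide
  | 8 => decide
  | 9 => decide
  | 10 => decide
  | 11 => decide
  | 12 => decide
  | 13 => decide
  | 14 => decide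
  | 15 => decide
  | (n + 16) =>
    unfold Nat.digitChar
    repeat rw [if_neg (by omega)]
    decide

theorem pvToDigitsCore_good (b : Nat) :
    ∀ (f n : Nat) (l : List Char), (∀ a ∈ l, a ≠ '<' ∧ a ≠ '>') →
      ∀ a ∈ Nat.toDigitsCore b f n l, a ≠ '<' ∧ a ≠ '>' := by
  intro f
  induction f with
  | zero => intro n l hl; simpa [Nat.toDigitsCore] using hl
  | succ f ih =>
    intro n l hl a ha
    rw [Nat.toDigitsCore] at ha
    by_cases hz : n / b = 0
    · simp only [hz] at ha
      rcases List.mem_cons.mp ha with rfl | hmem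
      · exact pvDigitChar_good _
      · exact hl a hmem
    · simp only [if_neg hz] at ha
      refine ih (n / b) (Nat.digitChar (n % b) :: l) ?_ a ha
      intro x hx
      rcases List.mem_cons.mp hx with rfl | hmem
      · exact pvDigitChar_good _
      · exact hl x hmem

theorem pvToDigitsCore_ne_nil (b : Nat) :
    ∀ (f n : Nat) (l : List Char), l ≠ [] → Nat.toDigitsCore b f n l ≠ [] := by
  intro f
  induction f with
  | zero => intro n l hl; simpa [Nat.toDigitsCore] using hl
  | succ f ih =>
    intro n l hl
    rw [Nat.toDigitsCore]
    by_cases hz : n / b = 0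
    · simp [hz]
    · simp only [if_neg hz]
      exact ih (n / b) _ (by simp)

theorem pvToDigits_ne_nil (b n : Nat) : Nat.toDigits b n ≠ [] := by
  rw [Nat.toDigits, Nat.toDigitsCore]
  by_cases hz : n / b = 0
  · simp [hz]
  · simp only [if_neg hz]
    exact pvToDigitsCore_ne_nil b n (n / b) _ (by simp)

theorem pvToChars_good (n : Int) : pvGood (PySem.Int.toChars n) := by
  rw [PySem.Int.toChars]
  intro a ha
  split at ha
  · rcases List.mem_cons.mp ha with rfl | hmem
    · exact ⟨by decide, by decide⟩
    · exact pvToDigitsCore_good 10 _ _ [] (by simp) a hmem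
  · exact pvToDigitsCore_good 10 _ _ [] (by simp) a ha

theorem pvToChars_ne_nil (n : Int) : PySem.Int.toChars n ≠ [] := by
  rw [PySem.Int.toChars]
  split
  · simp
  · exact pvToDigits_ne_nil 10 _

-- soundness and completeness of a match attempt
theorem pvCellParse_sound {s c r : List Char} (h : pvCellParse s = some (c, r)) :
    s = pvCell c ++ r ∧ pvGood c := by
  unfold pvCellParse at h
  split at h
  · rename_i rest
    split at h
    · rename_i r' hdw
      injection h with h'
      injection h' with hc hr
      subst hc; subst hr
      constructor
      · have hr2 : rest = rest.takeWhile pvNoAngle ++ ('<' :: '/' :: 't' :: 'd' :: '>' :: r') := by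
          conv_lhs => rw [← List.takeWhile_append_dropWhile (p := pvNoAngle) (l := rest)]
          rw [hdw]
        simp only [pvCell, pvTD, pvTDc]
        conv_lhs => rw [hr2]
        simp
      · intro a ha
        have := List.mem_takeWhile_imp ha
        simp only [pvNoAngle, Bool.and_eq_true, bne_iff_ne] at this
        exact this
    · exact absurd h (by simp)
  · exact absurd h (by simp)

theorem pvCellParse_complete {c : List Char} (hc : pvGood c) (r : List Char) :
    pvCellParse (pvCell c ++ r) = some (c, r) := by
  have hall : ∀ a ∈ c, pvNoAngle a = true := by
    intro a ha
    have := hc a ha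
    simp [pvNoAngle, this.1, this.2]
  have hshape : pvCell c ++ r = '<' :: 't' :: 'd' :: '>' :: (c ++ ('<' :: '/' :: 't' :: 'd' :: '>' :: r)) := by
    simp [pvCell, pvTD, pvTDc]
  rw [hshape]
  unfold pvCellParse
  have hdw : (c ++ ('<' :: '/' :: 't' :: 'd' :: '>' :: r)).dropWhile pvNoAngle
      = '<' :: '/' :: 't' :: 'd' :: '>' :: r := by
    rw [List.dropWhile_append]
    have h1 : c.dropWhile pvNoAngle = [] := List.dropWhile_eq_nil_iff.mpr (fun x hx => hall x hx)
    rw [h1]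
    simp [pvNoAngle]
  have htw : (c ++ ('<' :: '/' :: 't' :: 'd' :: '>' :: r)).takeWhile pvNoAngle = c := by
    have h1 : c.takeWhile pvNoAngle = c := List.takeWhile_eq_self_iff.mpr (fun x hx => hall x hx)
    rw [List.takeWhile_append, if_pos (by rw [h1])]
    simp [pvNoAngle]
  simp only [pvCellParse]
  rw [hdw, htw]
  rfl

-- unfolding lemmas for the scanner
theorem pvScan_nil (refs : PySem.Set (List Char)) : pvScan refs [] = [] := by rw [pvScan]

theorem pvScan_some (refs : PySem.Set (List Char)) {ch : Char} {t c r : List Char}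
    (h : pvCellParse (ch :: t) = some (c, r)) :
    pvScan refs (ch :: t) = (if refs.contains c then pvWrap c else pvCell c) ++ pvScan refs r := by
  rw [pvScan]
  split
  · rename_i c' r' h'
    rw [h] at h'
    injection h' with h''
    injection h''
    subst_vars
    simp [pvWrap, pvCell]
  · rename_i h'
    rw [h] at h'
    cases h'

theorem pvScan_none (refs : PySem.Set (List Char)) {ch : Char} {t : List Char}
    (h : pvCellParse (ch :: t) = none) :
    pvScan refs (ch :: t) = ch :: pvScan refs t := by
  rw [pvScan]
  split
  · rename_i c' r' h'
    rw [h] at h'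
    cases h'
  · rfl

-- literal decompositions
def pvW1r : List Char := " href=\"http://127.0.0.1:8000/playground/hello/".toList

theorem pvW1_decomp : pvW1 = "<td><a".toList ++ pvW1r := by rfl
theorem pvLit_tda : "<td><a".toList = ['<', 't', 'd', '>', '<', 'a'] := by decide
theorem pvW1_eq : pvW1 = '<' :: 't' :: 'd' :: '>' :: '<' :: 'a' :: pvW1r := by
  rw [pvW1_decomp, pvLit_tda]; rfl
theorem pvW1r_all : pvW1r.all (fun a => a != '<') = true := by rfl
theorem pvW1r_noLt : ∀ a ∈ pvW1r, a ≠ '<' := by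
  have h := List.all_eq_true.mp pvW1r_all
  intro a ha
  simpa using h a ha
theorem pvW2_all : pvW2.all (fun a => a != '<') = true := by rfl
theorem pvW2_noLt : ∀ a ∈ pvW2, a ≠ '<' := by
  have h := List.all_eq_true.mp pvW2_all
  intro a ha
  simpa using h a ha
theorem pvEcond_pvW3 : pvEcond pvW3 = true := by rfl
theorem pvEcond_pvTDc : pvEcond pvTDc = true := by rfl

theorem pvCell_cons (c : List Char) : pvCell c = '<' :: 't' :: 'd' :: '>' :: (c ++ pvTDc) := by
  simp [pvCell, pvTD]

theorem pvGood_noLt {c : List Char} (h : pvGood c) : ∀ a ∈ c, a ≠ '<' :=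
  fun a ha => (h a ha).1

-- prefix helpers
theorem pvNotPrefix_head {p : List Char} {b : Char} {w : List Char} (hb : b ≠ '<') :
    ¬ ('<' :: p) <+: (b :: w) := by
  intro h
  rcases List.cons_prefix_cons.mp h with ⟨h1, _⟩
  exact hb h1.symm

theorem pvNoStart_cons {pat : List Char} {a : Char} {X : List Char}
    (h0 : ∀ y, ¬ pat <+: ((a :: X) ++ y)) (h1 : pvNoStart pat X) : pvNoStart pat (a :: X) := by
  intro z y hz hne hpre
  rcases List.suffix_cons_iff.mp hz with rfl | hz'
  · exact h0 y hpre
  · exact h1 z y hz' hne hpre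

-- no suffix of a non-matching cell starts an occurrence of the pattern cell
theorem pvNoStart_cell {id c : List Char} (hid : pvGood id) (hc : pvGood c) (hne : id ≠ c) :
    pvNoStart (pvCell id) (pvCell c) := by
  rw [pvCell_cons id, pvCell_cons c]
  apply pvNoStart_cons
  · intro y hpre
    rw [List.cons_append, List.cons_append, List.cons_append, List.cons_append] at hpre
    rcases List.cons_prefix_cons.mp hpre with ⟨_, hpre⟩
    rcases List.cons_prefix_cons.mp hpre with ⟨_, hpre⟩
    rcases List.cons_prefix_cons.mp hpre with ⟨_, hpre⟩
    rcases List.cons_prefix_cons.mp hpre with ⟨_, hpre⟩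
    have hshape : (c ++ pvTDc) ++ y = c ++ '<' :: '/' :: ('t' :: 'd' :: '>' :: y) := by
      simp [pvTDc]
    rw [hshape] at hpre
    exact pvK ('/' :: 't' :: 'd' :: '>' :: []) id c hne (pvGood_noLt hid) (pvGood_noLt hc)
      ('t' :: 'd' :: '>' :: y) (by simpa [pvTDc] using hpre)
  · apply pvNoStart_cons (fun y => pvNotPrefix_head (by decide))
    apply pvNoStart_cons (fun y => pvNotPrefix_head (by decide))
    apply pvNoStart_cons (fun y => pvNotPrefix_head (by decide))
    exact pvNoStart_of_pvEcond _ _ (pvEcond_append_noLt (pvGood_noLt hc) pvEcond_pvTDc)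

-- no suffix of an already-wrapped cell starts an occurrence of the pattern cell
theorem pvNoStart_wrap {id c : List Char} (hid : pvGood id) (hidne : id ≠ [])
    (hc : pvGood c) : pvNoStart (pvCell id) (pvWrap c) := by
  have hwrap : pvWrap c
      = '<' :: 't' :: 'd' :: '>' :: ('<' :: 'a' :: (pvW1r ++ c ++ pvW2 ++ c ++ pvW3)) := by
    simp [pvWrap, pvW1_eq]
  have hecond : pvEcond ('<' :: 'a' :: (pvW1r ++ c ++ pvW2 ++ c ++ pvW3)) = true := by
    rw [pvEcond]
    simp only [Bool.and_eq_true]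
    constructor
    · decide
    · have : pvEcond (c ++ pvW2 ++ c ++ pvW3) = true := by
        rw [List.append_assoc, List.append_assoc]
        apply pvEcond_append_noLt (pvGood_noLt hc)
        rw [← List.append_assoc]
        apply pvEcond_append_noLt
        · intro a ha
          rcases List.mem_append.mp ha with h | h
          · exact pvW2_noLt a h
          · exact (hc a h).1
        · exact pvEcond_pvW3
      have := pvEcond_append_noLt (l1 := 'a' :: pvW1r)
        (by
          intro a ha
          rcases List.mem_cons.mp ha with rfl | h
          · decide
          · exact pvW1r_noLt a h) this
      simpa using this
  rw [pvCell_cons id, hwrap]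
  apply pvNoStart_cons
  · intro y hpre
    rw [List.cons_append, List.cons_append, List.cons_append, List.cons_append] at hpre
    rcases List.cons_prefix_cons.mp hpre with ⟨_, hpre⟩
    rcases List.cons_prefix_cons.mp hpre with ⟨_, hpre⟩
    rcases List.cons_prefix_cons.mp hpre with ⟨_, hpre⟩
    rcases List.cons_prefix_cons.mp hpre with ⟨_, hpre⟩
    rw [List.cons_append] at hpre
    cases id with
    | nil => exact hidne rfl
    | cons i0 id' =>
      rw [List.cons_append] at hpre
      rcases List.cons_prefix_cons.mp hpre with ⟨hi0, _⟩
      exact (hid i0 (by simp)).1 hi0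
  · apply pvNoStart_cons (fun y => pvNotPrefix_head (by decide))
    apply pvNoStart_cons (fun y => pvNotPrefix_head (by decide))
    apply pvNoStart_cons (fun y => pvNotPrefix_head (by decide))
    exact pvNoStart_of_pvEcond _ _ hecond

-- an pvEcond-prefix cannot start with "<t"
theorem pvEcond_not_prefix_td {a : Char} {x' w : List Char} (hx : pvEcond (a :: x') = true) :
    ¬ (a :: x') <+: ('<' :: 't' :: w) := by
  intro hpre
  rcases List.cons_prefix_cons.mp hpre with ⟨rfl, hpre2⟩
  cases x' with
  | nil => simp [pvEcond] at hx
  | cons b x'' =>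
    rw [pvEcond, Bool.and_eq_true] at hx
    have hb : b ≠ 't' := by simpa using hx.1
    rcases List.cons_prefix_cons.mp hpre2 with ⟨hbt, _⟩
    exact hb hbt

-- a prefix of scanner output that cannot begin a cell is a prefix of the input
theorem pvE : ∀ (x : List Char), pvEcond x = true →
    ∀ (u : List Char) (refs : PySem.Set (List Char)), x <+: pvScan refs u → x <+: u := by
  intro x
  induction x with
  | nil => intro _ u refs _; exact List.nil_prefix
  | cons a x' ih =>
    intro hx u refs hpre
    cases u with
    | nil => rw [pvScan_nil] at hpre; exact absurd (List.prefix_nil.mp hpre) (by simp)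
    | cons ch t =>
      cases hp : pvCellParse (ch :: t) with
      | some p =>
        obtain ⟨c, r⟩ := p
        rw [pvScan_some refs hp] at hpre
        exfalso
        by_cases hb : refs.contains c
        · rw [if_pos hb, pvWrap, pvW1_eq] at hpre
          simp only [List.cons_append] at hpre
          exact pvEcond_not_prefix_td hx hpre
        · rw [if_neg hb, pvCell_cons] at hpre
          simp only [List.cons_append] at hpre
          exact pvEcond_not_prefix_td hx hpre
      | none =>
        rw [pvScan_none refs hp] at hpre
        rcases List.cons_prefix_cons.mp hpre with ⟨rfl, hpre2⟩
        exact List.cons_prefix_cons.mpr ⟨rfl, ih (pvEcond_tail hx) t refs hpre2⟩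

-- where no match attempt succeeds, the pattern cell is not a prefix of the scanner output
theorem pvNotCellPrefix {ch : Char} {t : List Char} {refs : PySem.Set (List Char)}
    {id : List Char} (hp : pvCellParse (ch :: t) = none) (hid : pvGood id) :
    ¬ pvCell id <+: (ch :: pvScan refs t) := by
  intro hpre
  rw [pvCell_cons] at hpre
  rcases List.cons_prefix_cons.mp hpre with ⟨rfl, hpre2⟩
  have hec : pvEcond ('t' :: 'd' :: '>' :: (id ++ pvTDc)) = true := by
    rw [pvEcond_cons_of_ne _ (by decide), pvEcond_cons_of_ne _ (by decide),
      pvEcond_cons_of_ne _ (by decide)]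
    exact pvEcond_append_noLt (pvGood_noLt hid) pvEcond_pvTDc
  obtain ⟨rest, rfl⟩ := pvE _ hec t refs hpre2
  have : pvCellParse ('<' :: (('t' :: 'd' :: '>' :: (id ++ pvTDc)) ++ rest)) = some (id, rest) := by
    have hshape : ('<' :: (('t' :: 'd' :: '>' :: (id ++ pvTDc)) ++ rest)) = pvCell id ++ rest := by
      rw [pvCell_cons]; simp
    rw [hshape]
    exact pvCellParse_complete hid rest
  rw [this] at hp
  cases hp

theorem pvRepl_nil (old new : List Char) : pvRepl old new [] = [] := by rw [pvRepl]

-- one replace pass over already-scanned text wraps exactly the unwrapped cells equal to id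
theorem pvL : ∀ (n : Nat) (u : List Char), u.length ≤ n →
    ∀ (refs : PySem.Set (List Char)) (id : List Char), pvGood id → id ≠ [] →
    pvRepl (pvCell id) (pvWrap id) (pvScan refs u) = pvScan (PySem.Set.add refs id) u := by
  intro n
  induction n with
  | zero =>
    intro u hu refs id _ _
    have : u = [] := by cases u <;> simp_all
    subst this
    rw [pvScan_nil, pvScan_nil, pvRepl_nil]
  | succ n ih =>
    intro u hu refs id hid hidne
    cases u with
    | nil => rw [pvScan_nil, pvScan_nil, pvRepl_nil]
    | cons ch t =>
      cases hp : pvCellParse (ch :: t) with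
      | none =>
        rw [pvScan_none refs hp, pvScan_none _ hp]
        rw [pvRepl]
        rw [if_neg (by
          rw [List.isPrefixOf_iff_prefix]
          exact fun h => pvNotCellPrefix hp hid h)]
        rw [ih t (by simpa using hu) refs id hid hidne]
      | some p =>
        obtain ⟨c, r⟩ := p
        have hr : r.length ≤ n := by
          have := pvCellParse_shrink hp
          simp at this
          simp at hu
          omega
        have hcgood : pvGood c := (pvCellParse_sound hp).2
        rw [pvScan_some refs hp, pvScan_some _ hp]
        by_cases hb : refs.contains c = true
        · have hb' : (PySem.Set.add refs id).contains c = true :=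
            (PySem.Set.contains_iff _ _).mpr
              ((PySem.Set.mem_add refs id c).mpr (Or.inl ((PySem.Set.contains_iff _ _).mp hb)))
          rw [if_pos hb, if_pos hb']
          rw [pvCell_cons id] at *
          rw [pvRepl_skip '<' _ _ (pvWrap c) (pvScan refs r)
            (by rw [← pvCell_cons]; exact pvNoStart_wrap hid hidne hcgood)]
          rw [← pvCell_cons] at *
          rw [ih r hr refs id hid hidne]
        · by_cases hc : c = id
          · subst hc
            have hb' : (PySem.Set.add refs c).contains c = true :=
              (PySem.Set.contains_iff _ _).mpr ((PySem.Set.mem_add refs c c).mpr (Or.inr rfl))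
            rw [if_neg hb, if_pos hb']
            rw [pvCell_cons c] at *
            rw [pvRepl_matched]
            rw [← pvCell_cons] at *
            rw [ih r hr refs c hid hidne]
          · have hb' : ¬ (PySem.Set.add refs id).contains c = true := by
              intro h
              rcases (PySem.Set.mem_add refs id c).mp ((PySem.Set.contains_iff _ _).mp h) with h' | h'
              · exact hb ((PySem.Set.contains_iff _ _).mpr h')
              · exact hc h'
            rw [if_neg hb, if_neg hb']
            rw [pvCell_cons id] at *
            rw [pvRepl_skip '<' _ _ (pvCell c) (pvScan refs r)
              (by rw [← pvCell_cons]; exact pvNoStart_cell hid hcgood (fun h => hc h.symm))]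
            rw [← pvCell_cons] at *
            rw [ih r hr refs id hid hidne]

-- with no refnos the scanner reproduces its input
theorem pvScan_empty : ∀ (n : Nat) (u : List Char), u.length ≤ n →
    pvScan ([] : PySem.Set (List Char)) u = u := by
  intro n
  induction n with
  | zero =>
    intro u hu
    have : u = [] := by cases u <;> simp_all
    subst this
    exact pvScan_nil _
  | succ n ih =>
    intro u hu
    cases u with
    | nil => exact pvScan_nil _
    | cons ch t =>
      cases hp : pvCellParse (ch :: t) with
      | none => rw [pvScan_none _ hp, ih t (by simpa using hu)]
      | some p =>
        obtain ⟨c, r⟩ := p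
        have hsound := pvCellParse_sound hp
        have hr : r.length ≤ n := by
          have := pvCellParse_shrink hp
          simp at this
          simp at hu
          omega
        rw [pvScan_some _ hp]
        rw [if_neg (by
          intro h
          simp at h)]
        rw [ih r hr, hsound.1]

-- A's loop body is one fuel-free replace with the cell pattern and wrapped replacement
theorem pvLit_cur (id : List Char) :
    "<td>".toList ++ id ++ "</td>".toList = pvCell id := by
  have h1 : "<td>".toList = pvTD := by decide
  have h2 : "</td>".toList = pvTDc := by decide
  rw [h1, h2, pvCell]

theorem pvLit_rep (id : List Char) :
    "<td>".toList ++ ("<a href=\"".toList ++ ("http://127.0.0.1:8000/playground/hello/".toList ++ id)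
      ++ "\" target=\"_blank\">".toList ++ id ++ "</a>".toList) ++ "</td>".toList = pvWrap id := by
  have h1 : "<td>".toList ++ "<a href=\"".toList ++ "http://127.0.0.1:8000/playground/hello/".toList
      = pvW1 := by rfl
  have h2 : "\" target=\"_blank\">".toList = pvW2 := by rfl
  have h3 : "</a>".toList ++ "</td>".toList = pvW3 := by rfl
  rw [pvWrap, ← h1, h2, ← h3]
  simp [List.append_assoc]

theorem pvStep_eq (html : List Char) (rn : Int) :
    pvStep html rn
      = pvRepl (pvCell (PySem.Int.toChars rn)) (pvWrap (PySem.Int.toChars rn)) html := by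
  rw [pvStep]
  rw [pvLit_cur, pvLit_rep]
  exact replace_eq_pvRepl html _ _ (by rw [pvCell_cons]; simp)

-- the whole of A's loop, started on scanned text, extends the scanner's refno set
theorem pvFold : ∀ (l : List Int) (refs : PySem.Set (List Char)) (s : List Char),
    l.foldl pvStep (pvScan refs s)
      = pvScan (l.foldl (fun r b => PySem.Set.add r (PySem.Int.toChars b)) refs) s := by
  intro l
  induction l with
  | nil => intro refs s; rfl
  | cons rn l ih =>
    intro refs s
    rw [List.foldl_cons, List.foldl_cons, pvStep_eq]
    rw [pvL s.length s le_rfl refs _ (pvToChars_good rn) (pvToChars_ne_nil rn)]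
    exact ih _ s
-- ===== VERDICT (by name: the statement is the Claim_ definition above) =====
theorem addLinksToRefNo_spec : Claim_equal_addLinksToRefNo := by
  intro newHTML RNList _
  unfold Spec_addLinksToRefNo addLinksToRefNo addLinksToRefNo_alt
  congr 1
  conv_lhs => rw [← pvScan_empty newHTML.toList.length newHTML.toList le_rfl]
  rw [pvFold]
  congr 1
  rw [← PySem.Set.update_map_eq_foldl_add, PySem.Set.update_nil_left]
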